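-- pv_equiv track=rewrite | github.com/MattClarke873/AdventOfCode | AoC_2023/2023_Day_3/main.py | find_gears
-- ===== SOURCE A (Python) =====
-- def find_gears(grid):
--     """Find the neighbours of the targets"""
--     count = 0
--     digit_hit = set()
--
--     directions = [
--         (-1,  0),  # up
--         (-1,  1),  # up-right
--         ( 0,  1),  # right
--         ( 1,  1),  # down-right
--         ( 1,  0),  # down
--         ( 1, -1),  # down-left
--         ( 0, -1),  # left
--         (-1, -1)   # up-left
--     ]
--
--     for y, row in enumerate(grid):
--         for x, char in enumerate(row):
--             if char == "*":
--                 for dy, dx in directions: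
--                     ny, nx = y + dy, x + dx
--                     if 0 <= ny < len(grid) and 0 <= nx < len(grid[ny]):
--                         neighbor_char = grid[ny][nx]
--                         if neighbor_char.isdigit() and count <2:
--                             digit_hit.add((ny,nx))
--                             count+=1
--                         if neighbor_char.isdigit() and count == 2:
--                             digit_hit.add((ny,nx))
--                             count = 0
--                             pass
--
--
--     return sorted(digit_hit)
-- ===== SOURCE B (Python) =====
-- def find_gears(grid):
--     """Find the neighbours of the targets"""
--     stars = {(y, x)
--              for y, row in enumerate(grid)
--              for x, char in enumerate(row)
--              if char == "*"}
--     neighbours = [(-1, -1), (-1, 0), (-1, 1), (0, -1), (0, 1), (1, -1), (1, 0), (1, 1)]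
--     return [(y, x)
--             for y, row in enumerate(grid)
--             for x, char in enumerate(row)
--             if char.isdigit()
--             and any((y + dy, x + dx) in stars for dy, dx in neighbours)]
-- ===== Notes on version B (the rewrite author's own statement) =====
-- stated objective: simpler
-- what changed: B inverts the traversal: it indexes all '*' positions in a set once, then emits digit cells with a starred neighbour in grid order (already sorted), dropping A's dead 'count' state-machine and A's star-centric neighbour scan with explicit bounds checks.
import Mathlib
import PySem

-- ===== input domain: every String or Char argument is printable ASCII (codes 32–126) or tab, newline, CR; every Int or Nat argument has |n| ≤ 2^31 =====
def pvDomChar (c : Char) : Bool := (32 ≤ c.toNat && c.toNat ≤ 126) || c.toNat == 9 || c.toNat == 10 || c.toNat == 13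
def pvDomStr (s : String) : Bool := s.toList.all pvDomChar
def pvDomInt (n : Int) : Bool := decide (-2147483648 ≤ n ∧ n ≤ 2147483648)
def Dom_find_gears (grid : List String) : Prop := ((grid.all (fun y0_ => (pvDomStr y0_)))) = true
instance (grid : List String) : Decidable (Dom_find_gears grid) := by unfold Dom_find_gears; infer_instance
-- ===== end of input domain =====

-- B replaces A's star-centric neighbour scan (with its dead `count` state machine) by a one-pass star-position
-- index plus a digit-centric grid scan that emits the result already in row-major order; objective: simpler.

-- ===== PORT A =====
def pvDirs : List (Int × Int) := [(-1,0),(-1,1),(0,1),(1,1),(1,0),(1,-1),(0,-1),(-1,-1)]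

-- body of A's innermost `for dy, dx in directions` loop; state = (count, digit_hit), updated sequentially as in A
def findGearsStep (grid : List String) (y x : Int) (st : Int × PySem.Set (Int × Int)) (d : Int × Int) :
    Int × PySem.Set (Int × Int) :=
  let ny := y + d.1
  let nx := x + d.2
  if 0 ≤ ny ∧ ny < (grid.length : Int) ∧ 0 ≤ nx ∧ nx < ((PySem.List.pyGetD grid ny "").toList.length : Int) then
    let nc := PySem.List.pyGetD (PySem.List.pyGetD grid ny "").toList nx ' '
    let st1 := if PySem.Chars.isdigit nc = true ∧ st.1 < 2 then (st.1 + 1, PySem.Set.add st.2 (ny, nx)) else st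
    if PySem.Chars.isdigit nc = true ∧ st1.1 = 2 then ((0 : Int), PySem.Set.add st1.2 (ny, nx)) else st1
  else st

def find_gears (grid : List String) : List (Int × Int) :=
  let final := (PySem.List.enumerate grid).foldl (fun st yr =>
    (PySem.List.enumerate yr.2.toList).foldl (fun st xc =>
      if xc.2 = '*' then pvDirs.foldl (findGearsStep grid yr.1 xc.1) st else st) st)
    ((0 : Int), PySem.Set.empty)
  PySem.List.sorted2 final.2 (fun p => p.1) (fun p => p.2)

-- ===== PORT B =====
def pvNeighbours : List (Int × Int) := [(-1,-1),(-1,0),(-1,1),(0,-1),(0,1),(1,-1),(1,0),(1,1)]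

-- B's first pass: the set comprehension of all '*' positions
def pvStarSet (grid : List String) : PySem.Set (Int × Int) :=
  (PySem.List.enumerate grid).foldl (fun s yr =>
    (PySem.List.enumerate yr.2.toList).foldl (fun s xc =>
      if xc.2 = '*' then PySem.Set.add s (yr.1, xc.1) else s) s) PySem.Set.empty

def find_gears_alt (grid : List String) : List (Int × Int) :=
  let stars := pvStarSet grid
  (PySem.List.enumerate grid).foldl (fun acc yr =>
    (PySem.List.enumerate yr.2.toList).foldl (fun acc xc =>
      if (PySem.Chars.isdigit xc.2 &&
          pvNeighbours.any (fun d => PySem.Set.contains stars (yr.1 + d.1, xc.1 + d.2))) = true then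
        acc ++ [(yr.1, xc.1)]
      else acc) acc) []

-- ===== PRECONDITION & SPEC =====
def Spec_find_gears (grid : List String) (out : List (Int × Int)) : Prop := out = find_gears_alt grid
instance (grid : List String) (out : List (Int × Int)) : Decidable (Spec_find_gears grid out) := by unfold Spec_find_gears; infer_instance

-- ===== CLAIM (what is proved, stated in full; the proofs are below) =====
def Claim_equal_find_gears : Prop := ∀ (grid : List String), Dom_find_gears grid → Spec_find_gears grid (find_gears grid)

-- ===== LEMMAS AND PROOFS =====

-- the bounds test both programs perform, and the cell accesses they perform
def pvInb (grid : List String) (y x : Int) : Prop :=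
  0 ≤ y ∧ y < (grid.length : Int) ∧ 0 ≤ x ∧ x < ((PySem.List.pyGetD grid y "").toList.length : Int)
def pvChar (grid : List String) (y x : Int) : Char :=
  PySem.List.pyGetD (PySem.List.pyGetD grid y "").toList x ' '
def pvDig (grid : List String) (y x : Int) : Prop := pvInb grid y x ∧ PySem.Chars.isdigit (pvChar grid y x) = true
def pvStarP (grid : List String) (y x : Int) : Prop := pvInb grid y x ∧ pvChar grid y x = '*'
-- "p is a digit cell with a starred neighbour": the characterisation both results are reduced to
def pvGood (grid : List String) (p : Int × Int) : Prop :=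
  pvDig grid p.1 p.2 ∧ ∃ d ∈ pvDirs, pvStarP grid (p.1 + d.1) (p.2 + d.2)

lemma pvDirs_neg : ∀ d ∈ pvDirs, ((-d.1, -d.2) : Int × Int) ∈ pvDirs := by decide
lemma pvNeighbours_sub : ∀ d ∈ pvNeighbours, d ∈ pvDirs := by decide
lemma pvDirs_sub : ∀ d ∈ pvDirs, d ∈ pvNeighbours := by decide

lemma step_lemma (grid : List String) (y x : Int) (st : Int × PySem.Set (Int × Int)) (d : Int × Int)
    (h : st.1 = 0 ∨ st.1 = 1) :
    ((findGearsStep grid y x st d).1 = 0 ∨ (findGearsStep grid y x st d).1 = 1)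
    ∧ (st.2.Nodup → (findGearsStep grid y x st d).2.Nodup)
    ∧ ∀ p, p ∈ (findGearsStep grid y x st d).2 ↔
        p ∈ st.2 ∨ (p = (y + d.1, x + d.2) ∧ pvDig grid p.1 p.2) := by
  simp only [findGearsStep]
  split_ifs with hin c1 c2 c3
  · -- in bounds, first add fired, second fired: st.1 = 1
    have hGood : pvDig grid (y + d.1) (x + d.2) := ⟨hin, c1.1⟩
    refine ⟨Or.inl rfl, fun hn => PySem.Set.nodup_add _ _ (PySem.Set.nodup_add _ _ hn), fun p => ?_⟩
    simp only [PySem.Set.mem_add]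
    constructor
    · rintro ((hp | rfl) | rfl)
      · exact Or.inl hp
      · exact Or.inr ⟨rfl, hGood⟩
      · exact Or.inr ⟨rfl, hGood⟩
    · rintro (hp | ⟨rfl, _⟩)
      · exact Or.inl (Or.inl hp)
      · exact Or.inr rfl
  · -- in bounds, first add fired only: st.1 = 0
    have h0 : st.1 = 0 := by
      rcases h with h0 | h1
      · exact h0
      · exact absurd ⟨c1.1, by omega⟩ c2
    have hGood : pvDig grid (y + d.1) (x + d.2) := ⟨hin, c1.1⟩
    refine ⟨Or.inr (by omega), fun hn => PySem.Set.nodup_add _ _ hn, fun p => ?_⟩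
    simp only [PySem.Set.mem_add]
    constructor
    · rintro (hp | rfl)
      · exact Or.inl hp
      · exact Or.inr ⟨rfl, hGood⟩
    · rintro (hp | ⟨rfl, _⟩)
      · exact Or.inl hp
      · exact Or.inr rfl
  · -- ¬c1 but c2: impossible since st.1 ∈ {0,1}
    exact absurd ⟨c3.1, by omega⟩ c1
  · -- in bounds, not a digit
    have hnd : ¬ PySem.Chars.isdigit
        (PySem.List.pyGetD (PySem.List.pyGetD grid (y + d.1) "").toList (x + d.2) ' ') = true := by
      intro hd; exact c1 ⟨hd, by omega⟩
    refine ⟨h, fun hn => hn, fun p => ?_⟩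
    constructor
    · exact Or.inl
    · rintro (hp | ⟨rfl, _, hdig⟩)
      · exact hp
      · exact absurd hdig hnd
  · -- out of bounds
    refine ⟨h, fun hn => hn, fun p => ?_⟩
    constructor
    · exact Or.inl
    · rintro (hp | ⟨rfl, hinb, _⟩)
      · exact hp
      · exact absurd hinb hin

lemma dirs_fold (grid : List String) (y x : Int) (ds : List (Int × Int))
    (st : Int × PySem.Set (Int × Int)) (h : st.1 = 0 ∨ st.1 = 1) :
    ((ds.foldl (findGearsStep grid y x) st).1 = 0 ∨ (ds.foldl (findGearsStep grid y x) st).1 = 1)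
    ∧ (st.2.Nodup → (ds.foldl (findGearsStep grid y x) st).2.Nodup)
    ∧ ∀ p, p ∈ (ds.foldl (findGearsStep grid y x) st).2 ↔
        p ∈ st.2 ∨ ∃ d ∈ ds, p = (y + d.1, x + d.2) ∧ pvDig grid p.1 p.2 := by
  induction ds generalizing st with
  | nil => exact ⟨h, fun hn => hn, fun p => by simp⟩
  | cons d ds ih =>
    obtain ⟨s1, s2, s3⟩ := step_lemma grid y x st d h
    obtain ⟨i1, i2, i3⟩ := ih (findGearsStep grid y x st d) s1
    refine ⟨i1, fun hn => i2 (s2 hn), fun p => ?_⟩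
    rw [List.foldl_cons] at *
    rw [i3 p]
    simp only [s3 p, List.mem_cons]
    constructor
    · rintro ((hp | ⟨hpd, hdig⟩) | ⟨d', hd', hpd, hdig⟩)
      · exact Or.inl hp
      · exact Or.inr ⟨d, Or.inl rfl, hpd, hdig⟩
      · exact Or.inr ⟨d', Or.inr hd', hpd, hdig⟩
    · rintro (hp | ⟨d', (rfl | hd'), hpd, hdig⟩)
      · exact Or.inl (Or.inl hp)
      · exact Or.inl (Or.inr ⟨hpd, hdig⟩)
      · exact Or.inr ⟨d', hd', hpd, hdig⟩

lemma row_fold (grid : List String) (y : Int) (l : List (Int × Char))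
    (st : Int × PySem.Set (Int × Int)) (h : st.1 = 0 ∨ st.1 = 1) :
    (((l.foldl (fun st xc => if xc.2 = '*' then pvDirs.foldl (findGearsStep grid y xc.1) st else st) st).1 = 0 ∨
      (l.foldl (fun st xc => if xc.2 = '*' then pvDirs.foldl (findGearsStep grid y xc.1) st else st) st).1 = 1))
    ∧ (st.2.Nodup → (l.foldl (fun st xc => if xc.2 = '*' then pvDirs.foldl (findGearsStep grid y xc.1) st else st) st).2.Nodup)
    ∧ ∀ p, p ∈ (l.foldl (fun st xc => if xc.2 = '*' then pvDirs.foldl (findGearsStep grid y xc.1) st else st) st).2 ↔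
        p ∈ st.2 ∨ ∃ xc ∈ l, xc.2 = '*' ∧ ∃ d ∈ pvDirs, p = (y + d.1, xc.1 + d.2) ∧ pvDig grid p.1 p.2 := by
  induction l generalizing st with
  | nil => exact ⟨h, fun hn => hn, fun p => by simp⟩
  | cons xc l ih =>
    by_cases hs : xc.2 = '*'
    · obtain ⟨s1, s2, s3⟩ := dirs_fold grid y xc.1 pvDirs st h
      obtain ⟨i1, i2, i3⟩ := ih _ s1
      rw [List.foldl_cons, if_pos hs] at *
      refine ⟨i1, fun hn => i2 (s2 hn), fun p => ?_⟩
      rw [i3 p]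
      simp only [s3 p, List.mem_cons]
      constructor
      · rintro ((hp | ⟨d, hd, hpd, hdig⟩) | ⟨xc', hxc', hs', rest⟩)
        · exact Or.inl hp
        · exact Or.inr ⟨xc, Or.inl rfl, hs, d, hd, hpd, hdig⟩
        · exact Or.inr ⟨xc', Or.inr hxc', hs', rest⟩
      · rintro (hp | ⟨xc', (rfl | hxc'), hs', rest⟩)
        · exact Or.inl (Or.inl hp)
        · exact Or.inl (Or.inr rest)
        · exact Or.inr ⟨xc', hxc', hs', rest⟩
    · obtain ⟨i1, i2, i3⟩ := ih st h
      rw [List.foldl_cons, if_neg hs] at *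
      refine ⟨i1, i2, fun p => ?_⟩
      rw [i3 p]
      simp only [List.mem_cons]
      constructor
      · rintro (hp | ⟨xc', hxc', rest⟩)
        · exact Or.inl hp
        · exact Or.inr ⟨xc', Or.inr hxc', rest⟩
      · rintro (hp | ⟨xc', (rfl | hxc'), hs', rest⟩)
        · exact Or.inl hp
        · exact absurd hs' hs
        · exact Or.inr ⟨xc', hxc', hs', rest⟩

lemma grid_fold (grid : List String) (l : List (Int × String))
    (st : Int × PySem.Set (Int × Int)) (h : st.1 = 0 ∨ st.1 = 1) :
    (st.2.Nodup → (l.foldl (fun st yr =>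
        (PySem.List.enumerate yr.2.toList).foldl (fun st xc =>
          if xc.2 = '*' then pvDirs.foldl (findGearsStep grid yr.1 xc.1) st else st) st) st).2.Nodup)
    ∧ ∀ p, p ∈ (l.foldl (fun st yr =>
        (PySem.List.enumerate yr.2.toList).foldl (fun st xc =>
          if xc.2 = '*' then pvDirs.foldl (findGearsStep grid yr.1 xc.1) st else st) st) st).2 ↔
        p ∈ st.2 ∨ ∃ yr ∈ l, ∃ xc ∈ PySem.List.enumerate yr.2.toList, xc.2 = '*' ∧
          ∃ d ∈ pvDirs, p = (yr.1 + d.1, xc.1 + d.2) ∧ pvDig grid p.1 p.2 := by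
  induction l generalizing st with
  | nil => exact ⟨fun hn => hn, fun p => by simp⟩
  | cons yr l ih =>
    obtain ⟨s1, s2, s3⟩ := row_fold grid yr.1 (PySem.List.enumerate yr.2.toList) st h
    obtain ⟨i2, i3⟩ := ih _ s1
    rw [List.foldl_cons] at *
    refine ⟨fun hn => i2 (s2 hn), fun p => ?_⟩
    rw [i3 p]
    simp only [s3 p, List.mem_cons]
    constructor
    · rintro ((hp | ⟨xc, hxc, rest⟩) | ⟨yr', hyr', rest⟩)
      · exact Or.inl hp
      · exact Or.inr ⟨yr, Or.inl rfl, xc, hxc, rest⟩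
      · exact Or.inr ⟨yr', Or.inr hyr', rest⟩
    · rintro (hp | ⟨yr', (rfl | hyr'), rest⟩)
      · exact Or.inl (Or.inl hp)
      · exact Or.inl (Or.inr rest)
      · exact Or.inr ⟨yr', hyr', rest⟩

lemma char_at (grid : List String) (k j : Nat) (hk : k < grid.length) (hj : j < (grid[k]).toList.length) :
    (grid[k]).toList[j] = pvChar grid (k : Int) (j : Int) := by
  simp only [pvChar, PySem.List.pyGetD_natCast, List.getD, List.getElem?_eq_getElem hk,
    Option.getD_some, List.getElem?_eq_getElem hj]

lemma inb_of_idx (grid : List String) (k j : Nat) (hk : k < grid.length) (hj : j < (grid[k]).toList.length) :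
    pvInb grid (k : Int) (j : Int) := by
  refine ⟨by positivity, by exact_mod_cast hk, by positivity, ?_⟩
  have : PySem.List.pyGetD grid (k : Int) "" = grid[k] := by
    simp [PySem.List.pyGetD_natCast, List.getD, hk]
  rw [this]; exact_mod_cast hj

lemma memA (grid : List String) (p : Int × Int) :
    p ∈ ((PySem.List.enumerate grid).foldl (fun st yr =>
      (PySem.List.enumerate yr.2.toList).foldl (fun st xc =>
        if xc.2 = '*' then pvDirs.foldl (findGearsStep grid yr.1 xc.1) st else st) st)
      ((0 : Int), PySem.Set.empty)).2 ↔ pvGood grid p := by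
  obtain ⟨-, h3⟩ := grid_fold grid (PySem.List.enumerate grid) ((0 : Int), PySem.Set.empty) (Or.inl rfl)
  rw [h3 p]
  simp only [PySem.Set.empty]  -- placeholder; membership in empty
  constructor
  · rintro (hp | ⟨yr, hyr, xc, hxc, hs, d, hd, rfl, hdig⟩)
    · simp [PySem.Set.empty] at hp
    · rw [PySem.List.mem_enumerate_iff] at hyr
      obtain ⟨k, hk, rfl⟩ := hyr
      rw [PySem.List.mem_enumerate_iff] at hxc
      obtain ⟨j, hj, rfl⟩ := hxc
      simp only [zero_add] at *
      refine ⟨hdig, (-d.1, -d.2), pvDirs_neg d hd, ?_⟩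
      have hstar : pvStarP grid (k : Int) (j : Int) := by
        refine ⟨inb_of_idx grid k j hk hj, ?_⟩
        rw [← char_at grid k j hk hj]; exact hs
      simpa using hstar
  · rintro ⟨hdig, d, hd, hinb, hstar⟩
    right
    have h0 : (0:Int) ≤ p.1 + d.1 := hinb.1
    have h1 : p.1 + d.1 < (grid.length : Int) := hinb.2.1
    set k := (p.1 + d.1).toNat with hkdef
    have hk : k < grid.length := by omega
    have hrow : PySem.List.pyGetD grid (p.1 + d.1) "" = grid[k] := by
      rw [show p.1 + d.1 = (k : Int) by omega]
      simp [PySem.List.pyGetD_natCast, List.getD, hk]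
    have h2 : (0:Int) ≤ p.2 + d.2 := hinb.2.2.1
    set j := (p.2 + d.2).toNat with hjdef
    have hj : j < (grid[k]).toList.length := by
      have := hinb.2.2.2
      rw [hrow] at this
      omega
    refine ⟨((k : Int), grid[k]), ?_, ((j : Int), (grid[k]).toList[j]), ?_, ?_, (-d.1, -d.2), pvDirs_neg d hd, ?_, ?_⟩
    · rw [PySem.List.mem_enumerate_iff]
      exact ⟨k, hk, by simp⟩
    · rw [PySem.List.mem_enumerate_iff]
      exact ⟨j, hj, by simp⟩
    · show grid[k].toList[j] = '*'
      rw [char_at grid k j hk hj]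
      rw [show ((k : Int)) = p.1 + d.1 by omega, show ((j : Int)) = p.2 + d.2 by omega]
      exact hstar
    · show p = ((k : Int) + -d.1, (j : Int) + -d.2)
      have e1 : (k : Int) = p.1 + d.1 := by omega
      have e2 : (j : Int) = p.2 + d.2 := by omega
      rw [e1, e2]
      exact Prod.ext (by ring) (by ring)
    · exact hdig

lemma star_row (y : Int) (l : List (Int × Char)) (s : PySem.Set (Int × Int)) :
    ∀ p, p ∈ l.foldl (fun s xc => if xc.2 = '*' then PySem.Set.add s (y, xc.1) else s) s ↔
      p ∈ s ∨ ∃ xc ∈ l, xc.2 = '*' ∧ p = (y, xc.1) := by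
  induction l generalizing s with
  | nil => intro p; simp
  | cons xc l ih =>
    intro p
    rw [List.foldl_cons]
    by_cases hs : xc.2 = '*'
    · rw [if_pos hs, ih]
      simp only [PySem.Set.mem_add, List.mem_cons]
      constructor
      · rintro ((hp | rfl) | ⟨xc', hxc', rest⟩)
        · exact Or.inl hp
        · exact Or.inr ⟨xc, Or.inl rfl, hs, rfl⟩
        · exact Or.inr ⟨xc', Or.inr hxc', rest⟩
      · rintro (hp | ⟨xc', (rfl | hxc'), hs', rfl⟩)
        · exact Or.inl (Or.inl hp)
        · exact Or.inl (Or.inr rfl)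
        · exact Or.inr ⟨xc', hxc', hs', rfl⟩
    · rw [if_neg hs, ih]
      simp only [List.mem_cons]
      constructor
      · rintro (hp | ⟨xc', hxc', rest⟩)
        · exact Or.inl hp
        · exact Or.inr ⟨xc', Or.inr hxc', rest⟩
      · rintro (hp | ⟨xc', (rfl | hxc'), hs', rfl⟩)
        · exact Or.inl hp
        · exact absurd hs' hs
        · exact Or.inr ⟨xc', hxc', hs', rfl⟩

lemma star_grid (l : List (Int × String)) (s : PySem.Set (Int × Int)) :
    ∀ p, p ∈ l.foldl (fun s yr =>
        (PySem.List.enumerate yr.2.toList).foldl (fun s xc =>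
          if xc.2 = '*' then PySem.Set.add s (yr.1, xc.1) else s) s) s ↔
      p ∈ s ∨ ∃ yr ∈ l, ∃ xc ∈ PySem.List.enumerate yr.2.toList, xc.2 = '*' ∧ p = (yr.1, xc.1) := by
  induction l generalizing s with
  | nil => intro p; simp
  | cons yr l ih =>
    intro p
    rw [List.foldl_cons, ih, star_row]
    simp only [List.mem_cons]
    constructor
    · rintro ((hp | ⟨xc, hxc, rest⟩) | ⟨yr', hyr', rest⟩)
      · exact Or.inl hp
      · exact Or.inr ⟨yr, Or.inl rfl, xc, hxc, rest⟩
      · exact Or.inr ⟨yr', Or.inr hyr', rest⟩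
    · rintro (hp | ⟨yr', (rfl | hyr'), rest⟩)
      · exact Or.inl (Or.inl hp)
      · exact Or.inl (Or.inr rest)
      · exact Or.inr ⟨yr', hyr', rest⟩

lemma mem_starSet (grid : List String) (q : Int × Int) :
    q ∈ pvStarSet grid ↔ pvStarP grid q.1 q.2 := by
  rw [pvStarSet, star_grid]
  constructor
  · rintro (hp | ⟨yr, hyr, xc, hxc, hs, rfl⟩)
    · simp [PySem.Set.empty] at hp
    · rw [PySem.List.mem_enumerate_iff] at hyr
      obtain ⟨k, hk, rfl⟩ := hyr
      rw [PySem.List.mem_enumerate_iff] at hxc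
      obtain ⟨j, hj, rfl⟩ := hxc
      simp only [zero_add]
      refine ⟨inb_of_idx grid k j hk hj, ?_⟩
      rw [← char_at grid k j hk hj]
      exact hs
  · rintro ⟨hinb, hstar⟩
    right
    have h0 : (0:Int) ≤ q.1 := hinb.1
    have h1 : q.1 < (grid.length : Int) := hinb.2.1
    set k := q.1.toNat with hkdef
    have hk : k < grid.length := by omega
    have hrow : PySem.List.pyGetD grid q.1 "" = grid[k] := by
      rw [show q.1 = (k : Int) by omega]
      simp [PySem.List.pyGetD_natCast, List.getD, hk]
    have h2 : (0:Int) ≤ q.2 := hinb.2.2.1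
    set j := q.2.toNat with hjdef
    have hj : j < (grid[k]).toList.length := by
      have := hinb.2.2.2
      rw [hrow] at this
      omega
    refine ⟨((k : Int), grid[k]), ?_, ((j : Int), (grid[k]).toList[j]), ?_, ?_, ?_⟩
    · rw [PySem.List.mem_enumerate_iff]; exact ⟨k, hk, by simp⟩
    · rw [PySem.List.mem_enumerate_iff]; exact ⟨j, hj, by simp⟩
    · show grid[k].toList[j] = '*'
      rw [char_at grid k j hk hj, show ((k:Int)) = q.1 by omega, show ((j:Int)) = q.2 by omega]
      exact hstar
    · exact Prod.ext (by simp; omega) (by simp; omega)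

-- a row's contribution to B's output
def pvRowOut (grid : List String) (yr : Int × String) : List (Int × Int) :=
  ((PySem.List.enumerate yr.2.toList).filter (fun xc =>
      PySem.Chars.isdigit xc.2 &&
        pvNeighbours.any (fun d => PySem.Set.contains (pvStarSet grid) (yr.1 + d.1, xc.1 + d.2)))).map
    (fun xc => (yr.1, xc.1))

lemma alt_eq_flatMap (grid : List String) :
    find_gears_alt grid = (PySem.List.enumerate grid).flatMap (pvRowOut grid) := by
  unfold find_gears_alt
  simp only [PySem.List.foldl_append_if]
  rw [PySem.List.foldl_append_eq_flatMap]
  simp only [List.nil_append]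
  rfl

lemma memB (grid : List String) (p : Int × Int) :
    p ∈ find_gears_alt grid ↔ pvGood grid p := by
  rw [alt_eq_flatMap]
  simp only [List.mem_flatMap, pvRowOut, List.mem_map, List.mem_filter,
    Bool.and_eq_true, List.any_eq_true, PySem.Set.contains_iff]
  constructor
  · rintro ⟨yr, hyr, xc, ⟨hxc, hdig, d, hd, hmem⟩, rfl⟩
    rw [PySem.List.mem_enumerate_iff] at hyr
    obtain ⟨k, hk, rfl⟩ := hyr
    rw [PySem.List.mem_enumerate_iff] at hxc
    obtain ⟨j, hj, rfl⟩ := hxc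
    simp only [zero_add] at *
    rw [mem_starSet] at hmem
    refine ⟨⟨inb_of_idx grid k j hk hj, by rw [← char_at grid k j hk hj]; exact hdig⟩,
      d, pvNeighbours_sub d hd, hmem⟩
  · rintro ⟨⟨hinb, hdig⟩, d, hd, hstar⟩
    have h0 : (0:Int) ≤ p.1 := hinb.1
    have h1 : p.1 < (grid.length : Int) := hinb.2.1
    set k := p.1.toNat with hkdef
    have hk : k < grid.length := by omega
    have hrow : PySem.List.pyGetD grid p.1 "" = grid[k] := by
      rw [show p.1 = (k : Int) by omega]
      simp [PySem.List.pyGetD_natCast, List.getD, hk]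
    have h2 : (0:Int) ≤ p.2 := hinb.2.2.1
    set j := p.2.toNat with hjdef
    have hj : j < (grid[k]).toList.length := by
      have := hinb.2.2.2
      rw [hrow] at this
      omega
    have ek : (k : Int) = p.1 := by omega
    have ej : (j : Int) = p.2 := by omega
    refine ⟨((k : Int), grid[k]), ?_, ((j : Int), (grid[k]).toList[j]), ⟨?_, ?_, d, pvDirs_sub d hd, ?_⟩, ?_⟩
    · rw [PySem.List.mem_enumerate_iff]; exact ⟨k, hk, by simp⟩
    · rw [PySem.List.mem_enumerate_iff]; exact ⟨j, hj, by simp⟩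
    · show PySem.Chars.isdigit (grid[k].toList[j]) = true
      rw [char_at grid k j hk hj, ek, ej]
      exact hdig
    · rw [mem_starSet]
      show pvStarP grid ((k:Int) + d.1) ((j:Int) + d.2)
      rw [ek, ej]
      exact hstar
    · exact Prod.ext (by simp [ek]) (by simp [ej])

lemma pairwiseB (grid : List String) :
    (find_gears_alt grid).Pairwise (fun a b => toLex a < toLex b) := by
  rw [alt_eq_flatMap, List.pairwise_flatMap]
  constructor
  · intro yr _
    unfold pvRowOut
    refine List.Pairwise.map _ ?_ (List.Pairwise.filter _ (PySem.List.pairwise_lt_enumerate _ _))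
    intro a b hab
    rw [Prod.Lex.lt_iff]
    exact Or.inr ⟨rfl, hab⟩
  · refine List.Pairwise.imp ?_ (PySem.List.pairwise_lt_enumerate _ _)
    intro yr yr' hlt p hp q hq
    simp only [pvRowOut, List.mem_map] at hp hq
    obtain ⟨xc, -, rfl⟩ := hp
    obtain ⟨xc', -, rfl⟩ := hq
    rw [Prod.Lex.lt_iff]
    exact Or.inl hlt

lemma nodupB (grid : List String) : (find_gears_alt grid).Nodup :=
  (pairwiseB grid).imp (fun h => by rintro rfl; exact lt_irrefl _ h)

lemma sorted2_lex (xs : List (Int × Int)) :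
    PySem.List.sorted2 xs (fun p => p.1) (fun p => p.2) false =
      PySem.List.sorted xs (fun p => toLex p) false := by
  unfold PySem.List.sorted2 PySem.List.sorted
  simp only [Bool.false_eq_true, if_false]
  have hb : ∀ a b : Int × Int,
      (decide (a.1 < b.1) || (!decide (b.1 < a.1) && decide (a.2 < b.2))) =
        decide (toLex a < toLex b) := by
    intro a b
    rw [Bool.eq_iff_iff]
    simp only [Bool.or_eq_true, Bool.and_eq_true, Bool.not_eq_true', decide_eq_true_eq,
      decide_eq_false_iff_not, Prod.Lex.lt_iff, ofLex_toLex]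
    omega
  simp only [hb]

lemma nodupA (grid : List String) :
    ((PySem.List.enumerate grid).foldl (fun st yr =>
      (PySem.List.enumerate yr.2.toList).foldl (fun st xc =>
        if xc.2 = '*' then pvDirs.foldl (findGearsStep grid yr.1 xc.1) st else st) st)
      ((0 : Int), PySem.Set.empty)).2.Nodup :=
  (grid_fold grid (PySem.List.enumerate grid) ((0 : Int), PySem.Set.empty) (Or.inl rfl)).1
    List.nodup_nil

-- ===== VERDICT (by name: the statement is the Claim_ definition above) =====
theorem find_gears_spec : Claim_equal_find_gears := by
  intro grid _
  show find_gears grid = find_gears_alt grid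
  rw [find_gears, sorted2_lex]
  refine PySem.List.sorted_eq_of_perm_of_pairwise_lt _ _ _ ?_ (pairwiseB grid)
  refine (List.perm_ext_iff_of_nodup (nodupB grid) (nodupA grid)).mpr ?_
  intro a
  rw [memB, memA]
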